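-- pv_equiv track=rewrite | github.com/CypherAk007/DSA | Recursion/00_Revision.py | Mazelstdiag
-- ===== SOURCE A (Python) =====
-- def Mazelstdiag(p,r,c):
--     if r==1 and c==1:
--         lst=[]
--         lst.append(p)
--         return lst
--     out=[]
--     if r>1:
--         out+=Mazelstdiag(p+'V',r-1,c)
--     if r>1 and c>1:
--         out+=Mazelstdiag(p+'D',r-1,c-1)
--     if c>1:
--         out+=Mazelstdiag(p+'H',r,c-1)
--     return out
-- ===== SOURCE B (Python) =====
-- def Mazelstdiag(p, r, c):
--     out = []
--     stack = [(p, r, c)]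
--     while stack:
--         path, rr, cc = stack.pop()
--         if rr == 1 and cc == 1:
--             out.append(path)
--             continue
--         # push in reverse of A's order so V is expanded first (LIFO)
--         if cc > 1:
--             stack.append((path + 'H', rr, cc - 1))
--         if rr > 1 and cc > 1:
--             stack.append((path + 'D', rr - 1, cc - 1))
--         if rr > 1:
--             stack.append((path + 'V', rr - 1, cc))
--     return out
-- ===== Notes on version B (the rewrite author's own statement) =====
-- stated objective: alternative
-- what changed: Replaces the recursive path enumeration by an iterative depth-first search with an explicit stack, pushing children in reverse (H, D, V) so the LIFO pop order reproduces A's output order.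
import Mathlib
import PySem

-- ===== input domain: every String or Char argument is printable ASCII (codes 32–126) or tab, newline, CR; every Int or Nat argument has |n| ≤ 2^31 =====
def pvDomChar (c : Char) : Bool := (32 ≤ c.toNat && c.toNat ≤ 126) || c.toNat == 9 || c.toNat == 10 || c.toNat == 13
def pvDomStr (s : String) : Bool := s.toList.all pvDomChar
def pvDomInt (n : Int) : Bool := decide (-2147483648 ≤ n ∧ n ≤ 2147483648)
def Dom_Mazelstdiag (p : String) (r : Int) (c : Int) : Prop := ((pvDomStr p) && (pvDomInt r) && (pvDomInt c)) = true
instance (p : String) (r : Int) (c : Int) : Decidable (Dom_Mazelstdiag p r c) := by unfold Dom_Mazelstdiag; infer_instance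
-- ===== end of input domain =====

-- B replaces the recursion by an explicit-stack iterative DFS (children pushed in reverse so the pop order reproduces A's output order); alternative decomposition, same cost.
-- Both ports use a Nat fuel argument purely as a totality guard (proved sufficient below); the computation is the same.

-- ===== PORT A =====
-- fuel-guarded transliteration of A's recursion; fuel r.toNat + c.toNat + 1 always suffices (mzA_fuel_irrelevant below)
def mzA : Nat → String → Int → Int → List String
  | 0, _, _, _ => []
  | fuel + 1, p, r, c =>
    if r = 1 ∧ c = 1 then
      [p]
    else
      let out : List String := []
      let out := if r > 1 then out ++ mzA fuel (p ++ "V") (r - 1) c else out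
      let out := if r > 1 ∧ c > 1 then out ++ mzA fuel (p ++ "D") (r - 1) (c - 1) else out
      let out := if c > 1 then out ++ mzA fuel (p ++ "H") r (c - 1) else out
      out

def Mazelstdiag (p : String) (r : Int) (c : Int) : List String :=
  mzA (r.toNat + c.toNat + 1) p r c

-- ===== PORT B =====
-- the while loop of Source B; the head of the list is the top of the stack; fuel 4 ^ (r.toNat + c.toNat)
-- bounds the number of iterations (proved below) and is only a totality guard
def mzLoop : Nat → List (String × Int × Int) → List String → List String
  | 0, _, out => out
  | _ + 1, [], out => out
  | fuel + 1, (path, rr, cc) :: rest, out =>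
    if rr = 1 ∧ cc = 1 then
      mzLoop fuel rest (out ++ [path])
    else
      mzLoop fuel (((if rr > 1 then [(path ++ "V", rr - 1, cc)] else []) ++
                    (if rr > 1 ∧ cc > 1 then [(path ++ "D", rr - 1, cc - 1)] else []) ++
                    (if cc > 1 then [(path ++ "H", rr, cc - 1)] else [])) ++ rest) out

def Mazelstdiag_alt (p : String) (r : Int) (c : Int) : List String :=
  mzLoop (4 ^ (r.toNat + c.toNat)) [(p, r, c)] []

-- ===== PRECONDITION & SPEC =====
-- Pre_ excludes only the deep inputs on which Python A exceeds CPython's recursion limit and raises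
-- RecursionError (the bound 900 keeps a safe margin below the default limit of 1000); A's recursion
-- depth grows with r + c.
def Pre_Mazelstdiag (p : String) (r : Int) (c : Int) : Prop := r.toNat + c.toNat ≤ 900
instance (p : String) (r : Int) (c : Int) : Decidable (Pre_Mazelstdiag p r c) := by unfold Pre_Mazelstdiag; infer_instance
def pvWitness_Mazelstdiag : String × Int × Int := ("", 2, 2)

def Spec_Mazelstdiag (p : String) (r : Int) (c : Int) (out : List String) : Prop := out = Mazelstdiag_alt p r c
instance (p : String) (r : Int) (c : Int) (out : List String) : Decidable (Spec_Mazelstdiag p r c out) := by unfold Spec_Mazelstdiag; infer_instance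

-- ===== CLAIM (what is proved, stated in full; the proofs are below) =====
def Claim_equal_Mazelstdiag : Prop := ∀ (p : String) (r : Int) (c : Int), Dom_Mazelstdiag p r c → Pre_Mazelstdiag p r c → Spec_Mazelstdiag p r c (Mazelstdiag p r c)

-- ===== LEMMAS AND PROOFS =====
-- weight of one stack entry, used for the loop's fuel bound
def mzWeight (s : String × Int × Int) : Nat := 4 ^ (s.2.1.toNat + s.2.2.toNat)

-- any sufficient fuel gives the same value
theorem mzA_fuel_irrelevant : ∀ (f g : Nat) (p : String) (r c : Int),
    r.toNat + c.toNat < f → r.toNat + c.toNat < g → mzA f p r c = mzA g p r c := by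
  intro f
  induction f with
  | zero => intro g p r c hf _; omega
  | succ f ih =>
    intro g p r c hf hg
    obtain ⟨g, rfl⟩ : ∃ g', g = g' + 1 := ⟨g - 1, by omega⟩
    by_cases hb : r = 1 ∧ c = 1
    · simp [mzA, hb]
    · have eV : r > 1 → mzA f (p ++ "V") (r - 1) c = mzA g (p ++ "V") (r - 1) c :=
        fun h => ih g (p ++ "V") (r - 1) c (by omega) (by omega)
      have eD : r > 1 ∧ c > 1 → mzA f (p ++ "D") (r - 1) (c - 1) = mzA g (p ++ "D") (r - 1) (c - 1) :=
        fun h => ih g (p ++ "D") (r - 1) (c - 1) (by omega) (by omega)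
      have eH : c > 1 → mzA f (p ++ "H") r (c - 1) = mzA g (p ++ "H") r (c - 1) :=
        fun h => ih g (p ++ "H") r (c - 1) (by omega) (by omega)
      simp only [mzA, if_neg hb]
      split_ifs with h1 h2 h3 h3 h2 h3 h3 <;>
        simp_all

-- A's recursion unfolded one step, in terms of Mazelstdiag itself
theorem mzA_unfold (p : String) (r c : Int) (hb : ¬(r = 1 ∧ c = 1)) :
    Mazelstdiag p r c =
      (if r > 1 then Mazelstdiag (p ++ "V") (r - 1) c else []) ++
      ((if r > 1 ∧ c > 1 then Mazelstdiag (p ++ "D") (r - 1) (c - 1) else []) ++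
       (if c > 1 then Mazelstdiag (p ++ "H") r (c - 1) else [])) := by
  have eV : r > 1 → mzA (r.toNat + c.toNat) (p ++ "V") (r - 1) c
      = mzA ((r - 1).toNat + c.toNat + 1) (p ++ "V") (r - 1) c :=
    fun h => mzA_fuel_irrelevant _ _ _ _ _ (by omega) (by omega)
  have eD : r > 1 ∧ c > 1 → mzA (r.toNat + c.toNat) (p ++ "D") (r - 1) (c - 1)
      = mzA ((r - 1).toNat + (c - 1).toNat + 1) (p ++ "D") (r - 1) (c - 1) :=
    fun h => mzA_fuel_irrelevant _ _ _ _ _ (by omega) (by omega)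
  have eH : c > 1 → mzA (r.toNat + c.toNat) (p ++ "H") r (c - 1)
      = mzA (r.toNat + (c - 1).toNat + 1) (p ++ "H") r (c - 1) :=
    fun h => mzA_fuel_irrelevant _ _ _ _ _ (by omega) (by omega)
  show mzA (r.toNat + c.toNat + 1) p r c = _
  rw [mzA, if_neg hb]
  simp only [Mazelstdiag]
  by_cases h1 : r > 1 <;> by_cases h3 : c > 1
  · simp [h1, h3, eV h1, eD ⟨h1, h3⟩, eH h3]
  · simp [h1, h3, eV h1]
  · simp [h1, h3, eH h3]
  · simp [h1, h3]

-- the children pushed in one iteration weigh strictly less than the popped entry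
theorem mz_children_lt (path : String) (rr cc : Int) :
    (List.map mzWeight ((if rr > 1 then [(path ++ "V", rr - 1, cc)] else []) ++
                        (if rr > 1 ∧ cc > 1 then [(path ++ "D", rr - 1, cc - 1)] else []) ++
                        (if cc > 1 then [(path ++ "H", rr, cc - 1)] else []))).sum
      < mzWeight (path, rr, cc) := by
  split_ifs with h1 h2 h3 h3 h2 h3 h3 <;>
    simp only [List.map_append, List.map_cons, List.map_nil, List.sum_append, List.sum_cons,
      List.sum_nil, List.append_nil, List.nil_append, mzWeight] <;>
  · try have h4 : (4:Nat) ^ (rr.toNat + cc.toNat) = 4 ^ (rr.toNat + cc.toNat - 1) * 4 := by rw [← pow_succ]; congr 1; omega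
    try have b1 : (4:Nat) ^ ((rr - 1).toNat + cc.toNat) ≤ 4 ^ (rr.toNat + cc.toNat - 1) := Nat.pow_le_pow_right (by norm_num) (by omega)
    try have b2 : (4:Nat) ^ ((rr - 1).toNat + (cc - 1).toNat) ≤ 4 ^ (rr.toNat + cc.toNat - 1) := Nat.pow_le_pow_right (by norm_num) (by omega)
    try have b3 : (4:Nat) ^ (rr.toNat + (cc - 1).toNat) ≤ 4 ^ (rr.toNat + cc.toNat - 1) := Nat.pow_le_pow_right (by norm_num) (by omega)
    try have hp : 0 < (4:Nat) ^ (rr.toNat + cc.toNat) := Nat.pow_pos (by norm_num)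
    omega

-- loop invariant: with fuel at least the total weight of the stack, the loop emits,
-- after out, the concatenation of A's results over the stack
theorem mzLoop_eq : ∀ (f : Nat) (st : List (String × Int × Int)) (out : List String),
    (st.map mzWeight).sum ≤ f →
    mzLoop f st out = out ++ st.flatMap (fun s => Mazelstdiag s.1 s.2.1 s.2.2) := by
  intro f
  induction f with
  | zero =>
    intro st out h
    cases st with
    | nil => simp [mzLoop]
    | cons s rest =>
      exfalso
      have hp : 0 < mzWeight s := Nat.pow_pos (by norm_num)
      simp only [List.map_cons, List.sum_cons] at h
      omega
  | succ f ih =>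
    intro st out h
    match st with
    | [] => simp [mzLoop]
    | (path, rr, cc) :: rest =>
      have hp : 0 < mzWeight (path, rr, cc) := Nat.pow_pos (by norm_num)
      by_cases hb : rr = 1 ∧ cc = 1
      · obtain ⟨rfl, rfl⟩ := hb
        rw [show mzLoop (f + 1) ((path, 1, 1) :: rest) out = mzLoop f rest (out ++ [path]) from by
          simp [mzLoop]]
        rw [ih rest (out ++ [path]) (by simp only [List.map_cons, List.sum_cons] at h; omega)]
        have hbase : Mazelstdiag path 1 1 = [path] := rfl
        simp [hbase]
      · rw [show mzLoop (f + 1) ((path, rr, cc) :: rest) out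
            = mzLoop f (((if rr > 1 then [(path ++ "V", rr - 1, cc)] else []) ++
                         (if rr > 1 ∧ cc > 1 then [(path ++ "D", rr - 1, cc - 1)] else []) ++
                         (if cc > 1 then [(path ++ "H", rr, cc - 1)] else [])) ++ rest) out from by
          simp [mzLoop, hb]]
        have hc := mz_children_lt path rr cc
        simp only [List.map_append, List.sum_append] at hc
        rw [ih _ out (by
          simp only [List.map_append, List.sum_append, List.map_cons, List.sum_cons] at h ⊢
          omega)]
        conv_rhs => rw [List.flatMap_cons, mzA_unfold path rr cc hb]
        simp only [List.flatMap_append, List.append_assoc]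
        split_ifs <;> simp

-- ===== VERDICT (by name: the statement is the Claim_ definition above) =====
theorem Mazelstdiag_spec : Claim_equal_Mazelstdiag := by
  intro p r c _ _
  unfold Spec_Mazelstdiag Mazelstdiag_alt
  rw [mzLoop_eq (4 ^ (r.toNat + c.toNat)) [(p, r, c)] [] (by simp [mzWeight])]
  simp
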